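-- pv_equiv track=rewrite | github.com/hyunjik11/advent-of-code-2024 | day12.py | num_consecutive_stretches
-- ===== SOURCE A (Python) =====
-- def num_consecutive_stretches(int_list: list[int]) -> int:
--   # Compute number of consecutive stretches of integers.
--   # e.g. [1,2,3,4,6,7,9,10,11] has 3 consecutive stretches
--   # (1,2,3,4), (6,7), (9,10,11)
--   if not int_list:
--     return 0
--   assert sorted(int_list) == int_list, int_list
--   stretch_count = 1
--   for i in range(1, len(int_list)):
--     # If there is a gap bigger than 1, we've found a new stretch
--     if int_list[i] - int_list[i-1] > 1:
--       stretch_count += 1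
--   return stretch_count
-- ===== SOURCE B (Python) =====
-- def num_consecutive_stretches(int_list: list[int]) -> int:
--   # A value starts a stretch iff its predecessor is absent: count those.
--   s = set(int_list)
--   return sum(1 for x in s if x - 1 not in s)
-- ===== Notes on version B (the rewrite author's own statement) =====
-- stated objective: idiomatic
-- what changed: Replaces the index loop comparing adjacent sorted elements with an order-independent membership set: count the values whose predecessor is absent from the set.
import Mathlib
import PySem

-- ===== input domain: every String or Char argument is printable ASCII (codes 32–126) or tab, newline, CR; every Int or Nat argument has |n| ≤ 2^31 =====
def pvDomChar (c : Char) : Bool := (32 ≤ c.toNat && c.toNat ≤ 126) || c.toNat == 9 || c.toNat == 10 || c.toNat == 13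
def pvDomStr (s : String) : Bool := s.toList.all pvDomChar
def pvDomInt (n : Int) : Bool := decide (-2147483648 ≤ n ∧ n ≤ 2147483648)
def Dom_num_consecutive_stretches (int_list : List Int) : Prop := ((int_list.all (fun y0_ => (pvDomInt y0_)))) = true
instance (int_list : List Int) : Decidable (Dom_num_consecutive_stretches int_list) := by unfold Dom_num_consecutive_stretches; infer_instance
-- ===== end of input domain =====

-- B replaces A's adjacent-difference index loop by an order-independent membership set
-- (count the values whose predecessor is absent); objective: idiomatic, same cost.

-- ===== PORT A =====
def num_consecutive_stretches (int_list : List Int) : Int :=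
  if int_list = [] then 0
  else
    -- the 'assert sorted(int_list) == int_list' is reflected by Pre_ below
    (PySem.List.pyRange 1 (int_list.length : Int) 1).foldl
      (fun stretch_count i =>
        if PySem.List.pyGetD int_list i 0 - PySem.List.pyGetD int_list (i - 1) 0 > 1
        then stretch_count + 1 else stretch_count) 1

-- ===== PORT B =====
def num_consecutive_stretches_alt (int_list : List Int) : Int :=
  let s : PySem.Set Int := PySem.Set.ofList int_list
  s.foldl (fun acc x => if PySem.Set.contains s (x - 1) then acc else acc + 1) 0

-- ===== PRECONDITION & SPEC =====
-- Pre_ excludes exactly the unsorted lists, on which A's assert raises AssertionError.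
def Pre_num_consecutive_stretches (int_list : List Int) : Prop :=
  int_list.Pairwise (· ≤ ·)
instance (int_list : List Int) : Decidable (Pre_num_consecutive_stretches int_list) := by
  unfold Pre_num_consecutive_stretches; infer_instance

def pvWitness_num_consecutive_stretches : List Int := [1, 2, 3, 4, 6, 7, 9, 10, 11]

def Spec_num_consecutive_stretches (int_list : List Int) (out : Int) : Prop := out = num_consecutive_stretches_alt int_list
instance (int_list : List Int) (out : Int) : Decidable (Spec_num_consecutive_stretches int_list out) := by unfold Spec_num_consecutive_stretches; infer_instance

-- ===== CLAIM (what is proved, stated in full; the proofs are below) =====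
def Claim_equal_num_consecutive_stretches : Prop := ∀ (int_list : List Int), Dom_num_consecutive_stretches int_list → Pre_num_consecutive_stretches int_list → Spec_num_consecutive_stretches int_list (num_consecutive_stretches int_list)


-- ===== LEMMAS AND PROOFS =====

-- number of adjacent gaps > 1
def gapCount (l : List Int) : Nat :=
  (l.zip l.tail).countP (fun p => decide (p.2 - p.1 > 1))

-- the predicate B counts, phrased over plain list membership
def startsStretch (l : List Int) : Int → Bool :=
  fun x => !(decide (x - 1 ∈ l))

lemma zip_tail_eq_map_range (l : List Int) :
    l.zip l.tail = (List.range (l.length - 1)).map (fun k => (l.getD k 0, l.getD (k+1) 0)) := by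
  induction l with
  | nil => simp
  | cons a t ih =>
    cases t with
    | nil => simp
    | cons b t' =>
      simp only [List.length_cons, Nat.add_sub_cancel, List.range_succ_eq_map, List.map_cons,
        List.map_map, List.tail_cons, List.zip_cons_cons]
      congr 1

lemma portA_eq_gapCount (l : List Int) (h : l ≠ []) :
    num_consecutive_stretches l = 1 + (gapCount l : Int) := by
  unfold num_consecutive_stretches
  rw [if_neg h, PySem.List.pyRange_one, List.foldl_map]
  have hlen : (((l.length : Int)) - 1).toNat = l.length - 1 := by omega
  rw [hlen]
  have hstep := PySem.List.foldl_congr_mem (l := List.range (l.length - 1)) (init := (1 : Int))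
    (f := fun (x : Int) (y : Nat) =>
      if PySem.List.pyGetD l (1 + (y : Int)) 0 - PySem.List.pyGetD l (1 + (y : Int) - 1) 0 > 1
      then x + 1 else x)
    (g := fun (acc : Int) (y : Nat) =>
      if decide (l.getD (y+1) 0 - l.getD y 0 > 1) then acc + 1 else acc)
    (by
      intro acc k _
      show (if PySem.List.pyGetD l (1 + (k : Int)) 0 - PySem.List.pyGetD l (1 + (k : Int) - 1) 0 > 1
            then acc + 1 else acc) =
           (if decide (l.getD (k+1) 0 - l.getD k 0 > 1) then acc + 1 else acc)
      rw [show (1 : Int) + (k : Int) = ((k + 1 : Nat) : Int) by push_cast; ring]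
      rw [show ((k + 1 : Nat) : Int) - 1 = ((k : Nat) : Int) by push_cast; ring]
      rw [PySem.List.pyGetD_natCast, PySem.List.pyGetD_natCast]
      simp [List.getD_eq_getElem?_getD])
  rw [hstep, PySem.List.foldl_if_add_one]
  congr 1
  unfold gapCount
  rw [zip_tail_eq_map_range, List.countP_map]
  rfl

lemma mem_ge_of_sorted {b : Int} {t : List Int} (h : (b :: t).Pairwise (· ≤ ·)) :
    ∀ x ∈ b :: t, b ≤ x := by
  intro x hx
  rcases List.mem_cons.mp hx with rfl | hx
  · exact le_refl x
  · exact (List.pairwise_cons.mp h).1 x hx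

lemma main_count (l : List Int) (hs : l.Pairwise (· ≤ ·)) (h : l ≠ []) :
    1 + (gapCount l : Int) = (((PySem.Set.ofList l).countP (startsStretch l) : Nat) : Int) := by
  induction l with
  | nil => exact absurd rfl h
  | cons a t ih =>
    cases t with
    | nil =>
      simp [gapCount, startsStretch, PySem.Set.ofList, PySem.Set.add, PySem.Set.empty,
        show ¬(a - 1 = a) by omega]
    | cons b t' =>
      have hab : a ≤ b := (List.pairwise_cons.mp hs).1 b (List.mem_cons_self ..)
      have hs' : (b :: t').Pairwise (· ≤ ·) := (List.pairwise_cons.mp hs).2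
      have hge : ∀ x ∈ b :: t', b ≤ x := mem_ge_of_sorted hs'
      have ihv := ih hs' (by simp)
      have hgap : (gapCount (a :: b :: t') : Int) =
          (if b - a > 1 then 1 else 0) + (gapCount (b :: t') : Int) := by
        unfold gapCount
        simp only [List.tail_cons, List.zip_cons_cons, List.countP_cons]
        push_cast
        rcases Classical.em (b - a > 1) with hba | hba <;> simp [hba] <;> ring
      -- the set side
      set s : PySem.Set Int := PySem.Set.ofList (b :: t') with hsdef
      have hsnodup : s.Nodup := PySem.Set.nodup_ofList _
      have hsmem : ∀ x, x ∈ s ↔ x ∈ b :: t' := fun x => PySem.Set.mem_ofList ..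
      by_cases haeq : a ∈ b :: t'
      · -- duplicate head: same set, same predicate
        have hperm : List.Perm (PySem.Set.ofList (a :: b :: t')) s := by
          rw [List.perm_ext_iff_of_nodup (PySem.Set.nodup_ofList _) hsnodup]
          intro x
          rw [PySem.Set.mem_ofList, hsmem]
          constructor
          · intro hx; rcases List.mem_cons.mp hx with rfl | hx
            · exact haeq
            · exact hx
          · exact fun hx => List.mem_cons_of_mem _ hx
        have hab' : a = b := le_antisymm hab (hge a haeq)
        have hpred : ∀ x ∈ s, startsStretch (a :: b :: t') x = startsStretch (b :: t') x := by
          intro x _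
          unfold startsStretch
          rw [hab']
          simp [List.mem_cons]
        rw [hgap, hperm.countP_eq, List.countP_congr (fun x hx => by rw [hpred x hx]), ← ihv,
          if_neg (by omega : ¬ (b - a > 1))]
        ring
      · -- new head a < b (a ∉ b :: t')
        have halt : a < b := lt_of_le_of_ne hab (fun he => haeq (he ▸ List.mem_cons_self ..))
        have hperm : List.Perm (PySem.Set.ofList (a :: b :: t')) (a :: s) := by
          rw [List.perm_ext_iff_of_nodup (PySem.Set.nodup_ofList _)
            (List.nodup_cons.mpr ⟨fun hc => haeq ((hsmem a).mp hc), hsnodup⟩)]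
          intro x
          simp [PySem.Set.mem_ofList, List.mem_cons, hsmem]
        have hpa : startsStretch (a :: b :: t') a = true := by
          unfold startsStretch
          simp only [Bool.not_eq_eq_eq_not, Bool.not_true, decide_eq_false_iff_not]
          intro hc
          rcases List.mem_cons.mp hc with he | hc
          · omega
          · have := hge _ hc; omega
        have e1 : (PySem.Set.ofList (a :: b :: t')).countP (startsStretch (a :: b :: t')) =
            s.countP (startsStretch (a :: b :: t')) + 1 := by
          rw [hperm.countP_eq, List.countP_cons, hpa]
          simp
        by_cases hba : b - a > 1
        · -- gap: predicate unchanged on the tail set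
          have hpred : ∀ x ∈ s, startsStretch (a :: b :: t') x = startsStretch (b :: t') x := by
            intro x hx
            have hxb : b ≤ x := hge x ((hsmem x).mp hx)
            unfold startsStretch
            have : (x - 1 ∈ a :: b :: t') ↔ (x - 1 ∈ b :: t') := by
              rw [List.mem_cons]
              constructor
              · rintro (he | hm)
                · omega
                · exact hm
              · exact Or.inr
            simp [this]
          have e2 : s.countP (startsStretch (a :: b :: t')) =
              s.countP (startsStretch (b :: t')) :=
            List.countP_congr (fun x hx => by rw [hpred x hx])
          rw [hgap, if_pos hba, e1, e2]
          push_cast at ihv ⊢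
          omega
        · -- b = a + 1: b stops starting a stretch, a starts one
          have hb1 : b = a + 1 := by omega
          have hbs : b ∈ s := (hsmem b).mpr (List.mem_cons_self ..)
          have hperm2 : List.Perm s (b :: s.erase b) := List.perm_cons_erase hbs
          have hbne : b ∉ s.erase b := hsnodup.not_mem_erase
          have heraseSub : ∀ x ∈ s.erase b, x ∈ s := fun x hx => (List.erase_subset) hx
          have hcerase : ∀ x ∈ s.erase b,
              startsStretch (a :: b :: t') x = startsStretch (b :: t') x := by
            intro x hx
            have hxs := heraseSub x hx
            have hxne : x ≠ b := fun he => hbne (he ▸ hx)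
            have hxb : b ≤ x := hge x ((hsmem x).mp hxs)
            unfold startsStretch
            have : (x - 1 ∈ a :: b :: t') ↔ (x - 1 ∈ b :: t') := by
              rw [List.mem_cons]
              constructor
              · rintro (he | hm)
                · exfalso; apply hxne; omega
                · exact hm
              · exact Or.inr
            simp [this]
          have hpb : startsStretch (a :: b :: t') b = false := by
            unfold startsStretch
            simp only [Bool.not_eq_eq_eq_not, Bool.not_false, decide_eq_true_iff]
            have hba' : b - 1 = a := by omega
            rw [hba']
            exact List.mem_cons_self ..
          have hqb : startsStretch (b :: t') b = true := by
            unfold startsStretch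
            simp only [Bool.not_eq_eq_eq_not, Bool.not_true, decide_eq_false_iff_not]
            intro hc
            rcases List.mem_cons.mp hc with he | hc
            · omega
            · have := hge _ (List.mem_cons_of_mem _ hc); omega
          have hcong : (s.erase b).countP (startsStretch (a :: b :: t')) =
              (s.erase b).countP (startsStretch (b :: t')) :=
            List.countP_congr (fun x hx => by rw [hcerase x hx])
          have e2 : s.countP (startsStretch (a :: b :: t')) =
              (s.erase b).countP (startsStretch (b :: t')) := by
            rw [hperm2.countP_eq, List.countP_cons, hpb, hcong]
            simp
          have e3 : s.countP (startsStretch (b :: t')) =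
              (s.erase b).countP (startsStretch (b :: t')) + 1 := by
            rw [hperm2.countP_eq, List.countP_cons, hqb]
            simp
          rw [hgap, if_neg hba, e1, e2]
          push_cast at ihv ⊢
          omega

lemma portB_eq_count (l : List Int) :
    num_consecutive_stretches_alt l =
      (((PySem.Set.ofList l).countP (startsStretch l) : Nat) : Int) := by
  show (PySem.Set.ofList l).foldl
      (fun acc x => if PySem.Set.contains (PySem.Set.ofList l) (x - 1) then acc else acc + 1) 0 =
    (((PySem.Set.ofList l).countP (startsStretch l) : Nat) : Int)
  set s : PySem.Set Int := PySem.Set.ofList l with hsdef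
  have hcg : ∀ (acc : Int), ∀ x ∈ s,
      (fun (acc : Int) (x : Int) =>
        if PySem.Set.contains s (x - 1) then acc else acc + 1) acc x =
      (fun (acc : Int) (x : Int) =>
        if startsStretch l x then acc + 1 else acc) acc x := by
    intro acc x _
    show (if PySem.Set.contains s (x - 1) then acc else acc + 1) =
         (if startsStretch l x then acc + 1 else acc)
    have hc : PySem.Set.contains s (x - 1) = decide (x - 1 ∈ l) := by
      by_cases hm : x - 1 ∈ l
      · simp [hm, hsdef, PySem.Set.mem_ofList]
      · simp only [hm, decide_false]
        rw [Bool.eq_false_iff]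
        intro hc
        exact hm ((PySem.Set.mem_ofList ..).mp ((PySem.Set.contains_iff ..).mp hc))
    rw [hc]
    unfold startsStretch
    by_cases hm : x - 1 ∈ l
    · simp [hm]
    · simp [hm]
  have hstep := PySem.List.foldl_congr_mem (l := s) (init := (0 : Int))
    (f := fun (acc : Int) (x : Int) =>
      if PySem.Set.contains s (x - 1) then acc else acc + 1)
    (g := fun (acc : Int) (x : Int) =>
      if startsStretch l x then acc + 1 else acc) hcg
  rw [hstep, PySem.List.foldl_if_add_one]
  simp

-- ===== VERDICT (by name: the statement is the Claim_ definition above) =====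
theorem num_consecutive_stretches_spec : Claim_equal_num_consecutive_stretches := by
  intro l _ hpre
  unfold Spec_num_consecutive_stretches
  by_cases h : l = []
  · subst h; rfl
  · rw [portA_eq_gapCount l h, portB_eq_count l, main_count l hpre h]
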